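-- pv_equiv track=rewrite | github.com/brandonneth/MiniModeling | Dense/coefficients.py | for_loop_nest
-- ===== SOURCE A (Python) =====
-- def for_loop_nest(nesting_order, statement):
-- 	decls = ['for(int i%(num)d = 0; i%(num)d < N%(num)d; i%(num)d++) {' % {'num' : i} for i in tuple(nesting_order)]
--
-- 	nest = ''
-- 	indent = 0
-- 	for decl in decls:
-- 		nest += indent * ' ' + decl + '\n'
-- 		indent += 1
--
-- 	nest += indent*' ' + statement + '\n'
--
-- 	for decl in decls:
-- 		indent -= 1
-- 		nest += indent * " " + "}\n"
--
-- 	return nest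
-- ===== SOURCE B (Python) =====
-- def for_loop_nest(nesting_order, statement):
--     order = tuple(nesting_order)
--     n = len(order)
--
--     def line(k):
--         if k < n:
--             i = order[k]
--             return k * ' ' + 'for(int i%d = 0; i%d < N%d; i%d++) {' % (i, i, i, i) + '\n'
--         if k == n:
--             return n * ' ' + statement + '\n'
--         return (2 * n - k) * ' ' + '}\n'
--
--     return ''.join(line(k) for k in range(2 * n + 1))
-- ===== Notes on version B (the rewrite author's own statement) =====
-- stated objective: alternative
-- what changed: Drops A's decls list and its three stateful phases (two assembly loops plus a running indent counter): B maps one closed-form line function over the output line positions k in 0..2n (opening line, statement, or closing brace, with indent computed arithmetically from k) and joins once.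
import Mathlib
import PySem

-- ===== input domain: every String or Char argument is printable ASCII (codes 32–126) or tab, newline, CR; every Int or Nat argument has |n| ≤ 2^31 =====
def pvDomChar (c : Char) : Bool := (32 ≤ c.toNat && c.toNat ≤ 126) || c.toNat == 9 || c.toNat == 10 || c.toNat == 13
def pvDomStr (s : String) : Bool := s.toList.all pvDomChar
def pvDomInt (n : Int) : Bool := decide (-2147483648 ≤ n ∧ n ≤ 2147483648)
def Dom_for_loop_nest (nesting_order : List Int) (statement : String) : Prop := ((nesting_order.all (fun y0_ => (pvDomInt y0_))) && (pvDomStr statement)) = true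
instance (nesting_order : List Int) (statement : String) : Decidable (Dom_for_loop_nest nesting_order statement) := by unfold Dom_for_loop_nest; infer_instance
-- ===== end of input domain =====

-- B drops A's decls list and its three stateful phases (two loops + running indent):
-- it maps ONE closed-form line function over the output line positions 0..2n and joins.

-- Python's n * ' ' (empty for n ≤ 0)
def pvSpaces (n : Int) : String := String.ofList (List.replicate n.toNat ' ')

-- A's decl comprehension element ('%(num)d' % {'num': i} → str(i)); B builds the same
-- text inline with '%d' % i, which is the same string
def pvDecl (i : Int) : String :=
  "for(int i" ++ PySem.Int.toStr i ++ " = 0; i" ++ PySem.Int.toStr i ++ " < N" ++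
    PySem.Int.toStr i ++ "; i" ++ PySem.Int.toStr i ++ "++) {"

-- ===== PORT A =====
def for_loop_nest (nesting_order : List Int) (statement : String) : String :=
  let decls := nesting_order.map pvDecl
  let p1 := decls.foldl (fun (p : String × Int) decl =>
    (p.1 ++ pvSpaces p.2 ++ decl ++ "\n", p.2 + 1)) ("", 0)
  let nest := p1.1 ++ pvSpaces p1.2 ++ statement ++ "\n"
  let p2 := decls.foldl (fun (p : String × Int) _ =>
    (p.1 ++ pvSpaces (p.2 - 1) ++ "}\n", p.2 - 1)) (nest, p1.2)
  p2.1

-- ===== PORT B =====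
-- Source B's line(k); order[k] is read with pyGetD: exact, since the branch only runs for 0 ≤ k < n
def pvLine (order : List Int) (n : Int) (statement : String) (k : Int) : String :=
  if k < n then pvSpaces k ++ pvDecl (PySem.List.pyGetD order k 0) ++ "\n"
  else if k = n then pvSpaces n ++ statement ++ "\n"
  else pvSpaces (2 * n - k) ++ "}\n"

-- ''.join(parts): exact — the empty-separator join is plain concatenation
def pvJoin (parts : List String) : String := parts.foldl (· ++ ·) ""

def for_loop_nest_alt (nesting_order : List Int) (statement : String) : String :=
  let n : Int := nesting_order.length
  pvJoin ((PySem.List.pyRange 0 (2 * n + 1) 1).map (pvLine nesting_order n statement))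

-- ===== PRECONDITION & SPEC =====
def Spec_for_loop_nest (nesting_order : List Int) (statement : String) (out : String) : Prop := out = for_loop_nest_alt nesting_order statement
instance (nesting_order : List Int) (statement : String) (out : String) : Decidable (Spec_for_loop_nest nesting_order statement out) := by unfold Spec_for_loop_nest; infer_instance

-- ===== CLAIM (what is proved, stated in full; the proofs are below) =====
def Claim_equal_for_loop_nest : Prop := ∀ (nesting_order : List Int) (statement : String), Dom_for_loop_nest nesting_order statement → Spec_for_loop_nest nesting_order statement (for_loop_nest nesting_order statement)

-- ===== LEMMAS AND PROOFS =====

-- the opening lines emitted by A's first loop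
def pvOpens : List String → Int → String
  | [], _ => ""
  | d :: ds, n => pvSpaces n ++ d ++ "\n" ++ pvOpens ds (n + 1)

-- the closing braces emitted by A's second loop (k braces, starting from indent m)
def pvCloses : Nat → Int → String
  | 0, _ => ""
  | k + 1, m => pvSpaces (m - 1) ++ "}\n" ++ pvCloses k (m - 1)

theorem fold1_eq (ds : List String) : ∀ (s : String) (n : Int),
    ds.foldl (fun (p : String × Int) decl =>
      (p.1 ++ pvSpaces p.2 ++ decl ++ "\n", p.2 + 1)) (s, n)
      = (s ++ pvOpens ds n, n + ds.length) := by
  induction ds with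
  | nil => intro s n; simp [pvOpens]
  | cons d ds ih =>
      intro s n
      rw [List.foldl_cons, ih]
      simp only [Prod.mk.injEq]
      constructor
      · simp [pvOpens, String.append_assoc]
      · simp only [List.length_cons]; push_cast; omega

theorem fold2_eq (ds : List String) : ∀ (s : String) (m : Int),
    (ds.foldl (fun (p : String × Int) _ =>
      (p.1 ++ pvSpaces (p.2 - 1) ++ "}\n", p.2 - 1)) (s, m)).1
      = s ++ pvCloses ds.length m := by
  induction ds with
  | nil => intro s m; simp [pvCloses]
  | cons d ds ih =>
      intro s m
      rw [List.foldl_cons, ih]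
      simp [pvCloses, String.append_assoc]

theorem pvJoin_go (xs : List String) : ∀ (s : String),
    xs.foldl (· ++ ·) s = s ++ pvJoin xs := by
  induction xs with
  | nil => intro s; simp [pvJoin]
  | cons x xs ih =>
      intro s
      rw [List.foldl_cons, ih (s ++ x)]
      have hrhs : pvJoin (x :: xs) = ("" ++ x) ++ pvJoin xs := by
        rw [show pvJoin (x :: xs) = List.foldl (· ++ ·) ("" ++ x) xs from rfl, ih ("" ++ x)]
      rw [hrhs]
      simp [String.append_assoc]

theorem pvJoin_cons (x : String) (xs : List String) :
    pvJoin (x :: xs) = x ++ pvJoin xs := by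
  rw [show pvJoin (x :: xs) = List.foldl (· ++ ·) ("" ++ x) xs from rfl, pvJoin_go xs ("" ++ x)]
  simp

theorem pvJoin_append (xs ys : List String) :
    pvJoin (xs ++ ys) = pvJoin xs ++ pvJoin ys := by
  rw [show pvJoin (xs ++ ys) = List.foldl (· ++ ·) "" (xs ++ ys) from rfl, List.foldl_append,
    pvJoin_go ys]
  rfl

-- B's first n lines are A's opens
theorem opens_idx (l : List Int) : ∀ (a : Int),
    pvJoin ((List.range l.length).map
      (fun (k : Nat) => pvSpaces (a + (k : Int)) ++ pvDecl (PySem.List.pyGetD l (k : Int) 0) ++ "\n"))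
      = pvOpens (l.map pvDecl) a := by
  induction l with
  | nil => intro a; simp [pvJoin, pvOpens]
  | cons d l ih =>
      intro a
      rw [List.length_cons, List.range_succ_eq_map, List.map_cons, List.map_map, pvJoin_cons]
      have hmap : ((List.range l.length).map
          ((fun (k : Nat) => pvSpaces (a + (k : Int)) ++ pvDecl (PySem.List.pyGetD (d :: l) (k : Int) 0) ++ "\n")
            ∘ Nat.succ))
          = (List.range l.length).map
              (fun (k : Nat) => pvSpaces ((a + 1) + (k : Int)) ++ pvDecl (PySem.List.pyGetD l (k : Int) 0) ++ "\n") := by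
        apply List.map_congr_left
        intro k _
        have hidx : PySem.List.pyGetD (d :: l) ((Nat.succ k : Nat) : Int) 0
            = PySem.List.pyGetD l (k : Int) 0 := by
          have h1 : ((Nat.succ k : Nat) : Int) = ((k + 1 : Nat) : Int) := by norm_cast
          rw [h1, PySem.List.pyGetD_natCast, PySem.List.pyGetD_natCast]
          simp
        have hsp : a + ((Nat.succ k : Nat) : Int) = (a + 1) + (k : Int) := by push_cast; ring
        simp only [Function.comp, hidx, hsp]
      rw [hmap, ih (a + 1)]
      simp [pvOpens, String.append_assoc]

-- B's trailing lines are A's closes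
theorem closes_idx : ∀ (cnt : Nat) (c : Int),
    pvJoin ((List.range cnt).map (fun (j : Nat) => pvSpaces (c - 1 - (j : Int)) ++ "}\n"))
      = pvCloses cnt c := by
  intro cnt
  induction cnt with
  | zero => intro c; simp [pvJoin, pvCloses]
  | succ cnt ih =>
      intro c
      rw [List.range_succ_eq_map, List.map_cons, List.map_map, pvJoin_cons]
      have hmap : ((List.range cnt).map
          ((fun (j : Nat) => pvSpaces (c - 1 - (j : Int)) ++ "}\n") ∘ Nat.succ))
          = (List.range cnt).map (fun (j : Nat) => pvSpaces ((c - 1) - 1 - (j : Int)) ++ "}\n") := by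
        apply List.map_congr_left
        intro j _
        have : c - 1 - ((Nat.succ j : Nat) : Int) = (c - 1) - 1 - (j : Int) := by push_cast; ring
        simp only [Function.comp, this]
      rw [hmap, ih (c - 1)]
      simp [pvCloses]

theorem for_loop_nest_eq (nesting_order : List Int) (statement : String) :
    for_loop_nest nesting_order statement = for_loop_nest_alt nesting_order statement := by
  unfold for_loop_nest for_loop_nest_alt
  simp only [fold1_eq, fold2_eq]
  -- split B's range of line positions at n and n+1
  have hn : (0 : Int) ≤ (nesting_order.length : Int) := Int.natCast_nonneg _
  set n : Int := (nesting_order.length : Int) with hndef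
  have hsplit : PySem.List.pyRange 0 (2 * n + 1) 1
      = PySem.List.pyRange 0 n 1 ++ (PySem.List.pyRange n (n + 1) 1
          ++ PySem.List.pyRange (n + 1) (2 * n + 1) 1) := by
    rw [← PySem.List.pyRange_one_append n (n + 1) (2 * n + 1) (by omega) (by omega)]
    exact PySem.List.pyRange_one_append 0 n (2 * n + 1) hn (by omega)
  rw [hsplit, List.map_append, List.map_append, pvJoin_append, pvJoin_append]
  -- segment 1: the opening lines
  have hseg1 : pvJoin ((PySem.List.pyRange 0 n 1).map (pvLine nesting_order n statement))
      = pvOpens (nesting_order.map pvDecl) 0 := by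
    have hr : PySem.List.pyRange 0 n 1
        = (List.range nesting_order.length).map (fun (k : Nat) => ((k : Int))) := by
      rw [PySem.List.pyRange_one 0 n]
      have h1 : (n - 0).toNat = nesting_order.length := by simp [hndef]
      rw [h1]
      simp
    rw [hr, List.map_map]
    have hmap : ((List.range nesting_order.length).map
        ((pvLine nesting_order n statement) ∘ (fun (k : Nat) => ((k : Int)))))
        = (List.range nesting_order.length).map
            (fun (k : Nat) => pvSpaces (0 + (k : Int)) ++ pvDecl (PySem.List.pyGetD nesting_order (k : Int) 0) ++ "\n") := by
      apply List.map_congr_left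
      intro k hk
      rw [List.mem_range] at hk
      have hlt : ((k : Int)) < n := by rw [hndef]; exact_mod_cast hk
      simp only [Function.comp, pvLine, if_pos hlt]
      norm_num
    rw [hmap, opens_idx nesting_order 0]
  -- segment 2: the statement line
  have hseg2 : pvJoin ((PySem.List.pyRange n (n + 1) 1).map (pvLine nesting_order n statement))
      = pvSpaces n ++ statement ++ "\n" := by
    rw [PySem.List.pyRange_one_singleton]
    simp only [List.map_cons, List.map_nil, pvJoin_cons, pvLine]
    rw [if_neg (lt_irrefl n)]
    simp [pvJoin]
  -- segment 3: the closing braces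
  have hseg3 : pvJoin ((PySem.List.pyRange (n + 1) (2 * n + 1) 1).map (pvLine nesting_order n statement))
      = pvCloses nesting_order.length n := by
    have hr : PySem.List.pyRange (n + 1) (2 * n + 1) 1
        = (List.range nesting_order.length).map (fun (k : Nat) => (n + 1) + (k : Int)) := by
      rw [PySem.List.pyRange_one (n + 1) (2 * n + 1)]
      have h1 : ((2 * n + 1) - (n + 1)).toNat = nesting_order.length := by
        rw [hndef]; omega
      rw [h1]
    rw [hr, List.map_map]
    have hmap : ((List.range nesting_order.length).map
        ((pvLine nesting_order n statement) ∘ (fun (k : Nat) => (n + 1) + (k : Int))))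
        = (List.range nesting_order.length).map (fun (j : Nat) => pvSpaces (n - 1 - (j : Int)) ++ "}\n") := by
      apply List.map_congr_left
      intro k _
      have hk0 : (0 : Int) ≤ (k : Int) := Int.natCast_nonneg k
      simp only [Function.comp, pvLine]
      rw [if_neg (by omega), if_neg (by omega)]
      have : 2 * n - ((n + 1) + (k : Int)) = n - 1 - (k : Int) := by ring
      rw [this]
    rw [hmap, closes_idx nesting_order.length n]
  rw [hseg1, hseg2, hseg3]
  simp [hndef, String.append_assoc]

-- ===== VERDICT (by name: the statement is the Claim_ definition above) =====
theorem for_loop_nest_spec : Claim_equal_for_loop_nest := by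
  intro nesting_order statement _
  exact for_loop_nest_eq nesting_order statement
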